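-- pv_equiv track=rewrite | github.com/pypi-data/pypi-mirror-402 | packages/mdbq/mdbq-4.3.6.tar.gz/mdbq-4.3.6/mdbq/auth/auth_backend.py | _parse_user_agent
-- ===== SOURCE A (Python) =====
-- def _parse_user_agent(user_agent):
--     """解析User-Agent获取设备信息"""
--     if not user_agent:
--         return {
--             'device_type': 'unknown',
--             'platform': None,
--             'browser': None,
--             'device_name': 'Unknown Device'
--         }
--
--     user_agent_lower = user_agent.lower()
--
--     # 设备类型判断
--     if any(mobile in user_agent_lower for mobile in ['mobile', 'android', 'iphone', 'ipad']):
--         device_type = 'tablet' if 'ipad' in user_agent_lower else 'mobile'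
--     elif 'tablet' in user_agent_lower:
--         device_type = 'tablet'
--     else:
--         device_type = 'desktop'
--
--     # 平台识别
--     platform = None
--     if 'windows' in user_agent_lower:
--         platform = 'Windows'
--     elif 'mac' in user_agent_lower:
--         platform = 'macOS'
--     elif 'linux' in user_agent_lower:
--         platform = 'Linux'
--     elif 'android' in user_agent_lower:
--         platform = 'Android'
--     elif 'iphone' in user_agent_lower or 'ipad' in user_agent_lower:
--         platform = 'iOS'
--
--     # 浏览器识别
--     browser = None
--     if 'chrome' in user_agent_lower:
--         browser = 'Chrome'
--     elif 'firefox' in user_agent_lower: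
--         browser = 'Firefox'
--     elif 'safari' in user_agent_lower:
--         browser = 'Safari'
--     elif 'edge' in user_agent_lower:
--         browser = 'Edge'
--
--     # 生成设备名称
--     device_name = f"{platform or 'Unknown'}"
--     if browser:
--         device_name += f" - {browser}"
--     if device_type != 'desktop':
--         device_name += f" ({device_type.title()})"
--
--     return {
--         'device_type': device_type,
--         'platform': platform,
--         'browser': browser,
--         'device_name': device_name
--     }
-- ===== SOURCE B (Python) =====
-- # Different algorithm: one positional scan over the lowered UA collects every
-- # keyword occurrence into a set; all fields are then derived from that set
-- # (priority tables + look-up) and the name is assembled with join.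
--
-- _KEYWORDS = ('mobile', 'android', 'iphone', 'ipad', 'tablet',
--              'windows', 'mac', 'linux',
--              'chrome', 'firefox', 'safari', 'edge')
--
-- _DEVICE_RULES = [('ipad', 'tablet'), ('mobile', 'mobile'), ('android', 'mobile'),
--                  ('iphone', 'mobile'), ('tablet', 'tablet')]
-- _PLATFORM_RULES = [('windows', 'Windows'), ('mac', 'macOS'), ('linux', 'Linux'),
--                    ('android', 'Android'), ('iphone', 'iOS'), ('ipad', 'iOS')]
-- _BROWSER_RULES = [('chrome', 'Chrome'), ('firefox', 'Firefox'),
--                   ('safari', 'Safari'), ('edge', 'Edge')]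
--
--
-- def _pick(found, rules):
--     for kw, label in rules:
--         if kw in found:
--             return label
--     return None
--
--
-- def _parse_user_agent(user_agent):
--     """解析User-Agent获取设备信息"""
--     if not user_agent:
--         return {'device_type': 'unknown', 'platform': None, 'browser': None,
--                 'device_name': 'Unknown Device'}
--
--     ua = user_agent.lower()
--
--     # single pass over every position: record each keyword that starts there
--     found = set()
--     for i in range(len(ua)):
--         for kw in _KEYWORDS:
--             if ua.startswith(kw, i):
--                 found.add(kw)
--
--     device_type = _pick(found, _DEVICE_RULES) or 'desktop'
--     platform = _pick(found, _PLATFORM_RULES)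
--     browser = _pick(found, _BROWSER_RULES)
--
--     parts = [platform or 'Unknown']
--     if browser:
--         parts.append(f"- {browser}")
--     if device_type != 'desktop':
--         parts.append(f"({device_type.title()})")
--
--     return {'device_type': device_type, 'platform': platform, 'browser': browser,
--             'device_name': ' '.join(parts)}
-- ===== Notes on version B (the rewrite author's own statement) =====
-- stated objective: alternative
-- what changed: Instead of running an independent substring search per hard-coded branch, B makes one positional scan over the lowered UA that collects every occurring keyword into a set, then derives device type, platform and browser by priority-table lookup in that set and assembles the name with join.
import Mathlib
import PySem

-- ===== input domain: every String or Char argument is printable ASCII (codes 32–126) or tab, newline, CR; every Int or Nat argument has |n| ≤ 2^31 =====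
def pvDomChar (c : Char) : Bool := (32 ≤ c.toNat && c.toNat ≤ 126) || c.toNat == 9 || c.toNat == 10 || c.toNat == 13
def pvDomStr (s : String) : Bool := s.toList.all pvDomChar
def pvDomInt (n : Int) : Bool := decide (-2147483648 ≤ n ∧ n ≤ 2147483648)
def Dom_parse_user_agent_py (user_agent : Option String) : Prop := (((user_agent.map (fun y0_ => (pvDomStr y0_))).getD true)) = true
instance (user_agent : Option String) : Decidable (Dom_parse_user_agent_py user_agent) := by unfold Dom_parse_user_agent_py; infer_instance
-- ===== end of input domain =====

-- B replaces A's independent per-branch substring searches by one positional scan that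
-- collects all occurring keywords into a set, then derives the fields from that set
-- (alternative algorithm, same cost). Proved equal on all inputs.

-- str.title(), exact on ASCII: a letter is uppercased after a non-letter, lowercased after a letter
def pvTitleChars : List Char → Bool → List Char
  | [], _ => []
  | c :: rest, prev =>
      (if PySem.Chars.isalpha c then
         (if prev then PySem.Chars.lowerChar c else PySem.Chars.upperChar c)
       else c) :: pvTitleChars rest (PySem.Chars.isalpha c)

def pvTitle (s : String) : String := String.ofList (pvTitleChars s.toList false)

-- ===== PORT A =====
def parse_user_agent_py (user_agent : Option String) : List (String × Option String) :=
  match user_agent with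
  | none =>
      [("device_type", some "unknown"), ("platform", none), ("browser", none),
       ("device_name", some "Unknown Device")]
  | some ua =>
    if ua = "" then
      [("device_type", some "unknown"), ("platform", none), ("browser", none),
       ("device_name", some "Unknown Device")]
    else
      let ual := PySem.Str.lower ua
      let device_type :=
        if PySem.Str.isIn "mobile" ual || PySem.Str.isIn "android" ual ||
           PySem.Str.isIn "iphone" ual || PySem.Str.isIn "ipad" ual then
          (if PySem.Str.isIn "ipad" ual then "tablet" else "mobile")
        else if PySem.Str.isIn "tablet" ual then "tablet"
        else "desktop"
      let platform : Option String :=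
        if PySem.Str.isIn "windows" ual then some "Windows"
        else if PySem.Str.isIn "mac" ual then some "macOS"
        else if PySem.Str.isIn "linux" ual then some "Linux"
        else if PySem.Str.isIn "android" ual then some "Android"
        else if PySem.Str.isIn "iphone" ual || PySem.Str.isIn "ipad" ual then some "iOS"
        else none
      let browser : Option String :=
        if PySem.Str.isIn "chrome" ual then some "Chrome"
        else if PySem.Str.isIn "firefox" ual then some "Firefox"
        else if PySem.Str.isIn "safari" ual then some "Safari"
        else if PySem.Str.isIn "edge" ual then some "Edge"
        else none
      -- f"{platform or 'Unknown'}": the platform labels are non-empty, so `or` = getD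
      let device_name := platform.getD "Unknown"
      let device_name :=
        match browser with
        | some b => device_name ++ " - " ++ b
        | none => device_name
      let device_name :=
        if device_type ≠ "desktop" then device_name ++ " (" ++ pvTitle device_type ++ ")"
        else device_name
      [("device_type", some device_type), ("platform", platform), ("browser", browser),
       ("device_name", some device_name)]

-- ===== PORT B =====
def pvKeywords : List String :=
  ["mobile", "android", "iphone", "ipad", "tablet",
   "windows", "mac", "linux", "chrome", "firefox", "safari", "edge"]

def pvDeviceRules : List (String × String) :=
  [("ipad", "tablet"), ("mobile", "mobile"), ("android", "mobile"),
   ("iphone", "mobile"), ("tablet", "tablet")]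

def pvPlatformRules : List (String × String) :=
  [("windows", "Windows"), ("mac", "macOS"), ("linux", "Linux"),
   ("android", "Android"), ("iphone", "iOS"), ("ipad", "iOS")]

def pvBrowserRules : List (String × String) :=
  [("chrome", "Chrome"), ("firefox", "Firefox"), ("safari", "Safari"), ("edge", "Edge")]

-- the scan: for i in range(len(ua)): for kw in _KEYWORDS: if ua.startswith(kw, i): found.add(kw)
-- ua.startswith(kw, i) with 0 ≤ i ported by hand as kw.toList.isPrefixOf (ua.toList.drop i) — exact for 0 ≤ i
def pvScan (ua : String) : PySem.Set String :=
  (PySem.List.pyRange 0 (PySem.Str.len ua) 1).foldl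
    (fun found i =>
      pvKeywords.foldl
        (fun f kw => if kw.toList.isPrefixOf (ua.toList.drop i.toNat) then PySem.Set.add f kw else f)
        found)
    PySem.Set.empty

-- _pick: first label whose keyword is in the found set, else None
def pvPick (found : PySem.Set String) : List (String × String) → Option String
  | [] => none
  | (kw, label) :: rest =>
      if PySem.Set.contains found kw then some label else pvPick found rest

def parse_user_agent_py_alt (user_agent : Option String) : List (String × Option String) :=
  match user_agent with
  | none =>
      [("device_type", some "unknown"), ("platform", none), ("browser", none),
       ("device_name", some "Unknown Device")]
  | some ua0 =>
    if ua0 = "" then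
      [("device_type", some "unknown"), ("platform", none), ("browser", none),
       ("device_name", some "Unknown Device")]
    else
      let ua := PySem.Str.lower ua0
      let found := pvScan ua
      -- rule labels are non-empty, so Python's `or 'desktop'` is getD
      let device_type := (pvPick found pvDeviceRules).getD "desktop"
      let platform := pvPick found pvPlatformRules
      let browser := pvPick found pvBrowserRules
      let parts := [platform.getD "Unknown"]
      let parts := parts ++ (match browser with | some b => ["- " ++ b] | none => [])
      let parts := parts ++
        (if device_type ≠ "desktop" then ["(" ++ pvTitle device_type ++ ")"] else [])
      [("device_type", some device_type), ("platform", platform), ("browser", browser),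
       ("device_name", some (PySem.Str.join " " parts))]

-- ===== PRECONDITION & SPEC =====
def Spec_parse_user_agent_py (user_agent : Option String) (out : List (String × Option String)) : Prop := out = parse_user_agent_py_alt user_agent
instance (user_agent : Option String) (out : List (String × Option String)) : Decidable (Spec_parse_user_agent_py user_agent out) := by unfold Spec_parse_user_agent_py; infer_instance

-- ===== CLAIM (what is proved, stated in full; the proofs are below) =====
def Claim_equal_parse_user_agent_py : Prop := ∀ (user_agent : Option String), Dom_parse_user_agent_py user_agent → Spec_parse_user_agent_py user_agent (parse_user_agent_py user_agent)

-- ===== LEMMAS AND PROOFS =====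

-- membership after the inner fold over the keyword table
theorem mem_inner_fold (pred : String → Bool) (ks : List String) :
    ∀ (s : PySem.Set String) (x : String),
      x ∈ ks.foldl (fun f kw => if pred kw then PySem.Set.add f kw else f) s ↔
        x ∈ s ∨ (x ∈ ks ∧ pred x = true) := by
  induction ks with
  | nil => simp
  | cons k ks ih =>
    intro s x
    simp only [List.foldl_cons, ih]
    by_cases hp : pred k
    · simp only [hp, if_pos, PySem.Set.mem_add]
      constructor
      · rintro ((h | rfl) | h)
        · exact Or.inl h
        · exact Or.inr ⟨List.mem_cons_self, hp⟩
        · exact Or.inr ⟨List.mem_cons_of_mem _ h.1, h.2⟩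
      · rintro (h | ⟨hm, hx⟩)
        · exact Or.inl (Or.inl h)
        · rcases List.mem_cons.mp hm with rfl | hm
          · exact Or.inl (Or.inr rfl)
          · exact Or.inr ⟨hm, hx⟩
    · simp only [hp, Bool.false_eq_true]
      constructor
      · rintro (h | h)
        · exact Or.inl h
        · exact Or.inr ⟨List.mem_cons_of_mem _ h.1, h.2⟩
      · rintro (h | ⟨hm, hx⟩)
        · exact Or.inl h
        · rcases List.mem_cons.mp hm with rfl | hm
          · exact absurd hx (by simp [hp])
          · exact Or.inr ⟨hm, hx⟩

-- membership after the outer fold over the index list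
theorem mem_outer_fold (ua : String) (is : List Int) :
    ∀ (s : PySem.Set String) (x : String),
      x ∈ is.foldl
            (fun found i =>
              pvKeywords.foldl
                (fun f kw => if kw.toList.isPrefixOf (ua.toList.drop i.toNat) then PySem.Set.add f kw else f)
                found) s ↔
        x ∈ s ∨ (x ∈ pvKeywords ∧ ∃ i ∈ is, x.toList.isPrefixOf (ua.toList.drop i.toNat) = true) := by
  induction is with
  | nil => simp
  | cons i is ih =>
    intro s x
    simp only [List.foldl_cons, ih, mem_inner_fold]
    constructor
    · rintro ((h | ⟨hk, hp⟩) | ⟨hk, j, hj, hp⟩)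
      · exact Or.inl h
      · exact Or.inr ⟨hk, i, List.mem_cons_self, hp⟩
      · exact Or.inr ⟨hk, j, List.mem_cons_of_mem _ hj, hp⟩
    · rintro (h | ⟨hk, j, hj, hp⟩)
      · exact Or.inl (Or.inl h)
      · rcases List.mem_cons.mp hj with rfl | hj
        · exact Or.inl (Or.inr ⟨hk, hp⟩)
        · exact Or.inr ⟨hk, j, hj, hp⟩

-- the scan finds exactly the keywords occurring as substrings
theorem contains_pvScan (ua : String) (kw : String) (hk : kw ∈ pvKeywords) (hne : kw.toList ≠ []) :
    PySem.Set.contains (pvScan ua) kw = PySem.Str.isIn kw ua := by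
  have hmem : kw ∈ pvScan ua ↔ ∃ j, kw.toList <+: ua.toList.drop j := by
    unfold pvScan
    rw [mem_outer_fold]
    simp only [PySem.Set.empty, List.not_mem_nil, false_or]
    constructor
    · rintro ⟨-, i, hi, hp⟩
      exact ⟨i.toNat, List.isPrefixOf_iff_prefix.mp hp⟩
    · rintro ⟨j, hp⟩
      have hjlt : j < ua.toList.length := by
        by_contra hge
        have : ua.toList.drop j = [] := List.drop_eq_nil_of_le (by omega)
        rw [this] at hp
        exact hne (List.prefix_nil.mp hp)
      refine ⟨hk, (j : Int), ?_, ?_⟩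
      · rw [PySem.List.mem_pyRange_one]
        constructor
        · exact Int.natCast_nonneg j
        · simp only [PySem.Str.len_eq]
          exact_mod_cast hjlt
      · simpa using List.isPrefixOf_iff_prefix.mpr hp
  have hin : PySem.Str.isIn kw ua = true ↔ ∃ j, kw.toList <+: ua.toList.drop j := by
    rw [PySem.Str.isIn_eq]
    exact (PySem.Chars.exists_prefix_drop_iff_isIn _ _).symm
  rw [Bool.eq_iff_iff, PySem.Set.contains_iff, hmem, hin]

-- ===== VERDICT (by name: the statement is the Claim_ definition above) =====
theorem dev_eq (m a i p t : Bool) :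
    (if m || a || i || p then (if p then "tablet" else "mobile")
     else if t then "tablet" else "desktop")
    = Option.getD (if p then some "tablet" else if m then some "mobile"
        else if a then some "mobile" else if i then some "mobile"
        else if t then some "tablet" else none) "desktop" := by
  revert m a i p t; decide

theorem plat_eq (w mc l a i p : Bool) :
    (if w then some "Windows" else if mc then some "macOS" else if l then some "Linux"
     else if a then some "Android" else if i || p then some "iOS" else none)
    = (if w then some "Windows" else if mc then some "macOS" else if l then some "Linux"
       else if a then some "Android" else if i then some "iOS" else if p then some "iOS"
       else none) := by
  revert w mc l a i p; decide

theorem name_eq (pf br : Option String) (dt : String) :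
    (if dt ≠ "desktop" then
       (match br with
        | some b => pf.getD "Unknown" ++ " - " ++ b
        | none => pf.getD "Unknown") ++ " (" ++ pvTitle dt ++ ")"
     else
       match br with
       | some b => pf.getD "Unknown" ++ " - " ++ b
       | none => pf.getD "Unknown")
    = PySem.Str.join " "
        (([pf.getD "Unknown"] ++ (match br with | some b => ["- " ++ b] | none => [])) ++
         (if dt ≠ "desktop" then ["(" ++ pvTitle dt ++ ")"] else [])) := by
  cases br <;> split_ifs <;>
    (apply String.toList_inj.mp;
     simp [PySem.Str.join, PySem.Chars.join, List.intercalate])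

theorem parse_user_agent_py_spec : Claim_equal_parse_user_agent_py := by
  intro ua _
  unfold Spec_parse_user_agent_py
  cases ua with
  | none => rfl
  | some s =>
    by_cases hs : s = ""
    · simp [parse_user_agent_py, parse_user_agent_py_alt, hs]
    · simp only [parse_user_agent_py, parse_user_agent_py_alt, if_neg hs,
        pvPick, pvDeviceRules, pvPlatformRules, pvBrowserRules]
      rw [contains_pvScan _ "ipad" (by decide) (by decide),
          contains_pvScan _ "mobile" (by decide) (by decide),
          contains_pvScan _ "android" (by decide) (by decide),
          contains_pvScan _ "iphone" (by decide) (by decide),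
          contains_pvScan _ "tablet" (by decide) (by decide),
          contains_pvScan _ "windows" (by decide) (by decide),
          contains_pvScan _ "mac" (by decide) (by decide),
          contains_pvScan _ "linux" (by decide) (by decide),
          contains_pvScan _ "chrome" (by decide) (by decide),
          contains_pvScan _ "firefox" (by decide) (by decide),
          contains_pvScan _ "safari" (by decide) (by decide),
          contains_pvScan _ "edge" (by decide) (by decide)]
      rw [dev_eq, plat_eq, name_eq]
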